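-- pv_equiv track=rewrite | github.com/YashB63/GFG-Daily-Questions | Day 500/Reaching the heights/reaching_the_heights.py | reaching_height
-- ===== SOURCE A (Python) =====
-- def reaching_height (n, arr) :
--     if n==1:
--         return arr
--     if len(set(arr))==1:
--         return [-1]
--     arr.sort()
--     start=0
--     end=len(arr)-1
--     new=[]
--     while start<=end:
--         if start==end:
--             new.append(arr[start])
--         else:
--             new.append(arr[end])
--             new.append(arr[start])
--         start+=1
--         end-=1
--     return new
-- ===== SOURCE B (Python) =====
-- def reaching_height(n, arr):
--     if n == 1:
--         return arr
--     if len(set(arr)) == 1: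
--         return [-1]
--     arr.sort()
--     mid = len(arr) // 2
--     lower = arr[:mid]
--     upper = arr[mid:][::-1]
--     new = []
--     for hi, lo in zip(upper, lower):
--         new.append(hi)
--         new.append(lo)
--     if len(lower) < len(upper):
--         new.append(upper[-1])
--     return new
-- ===== Notes on version B (the rewrite author's own statement) =====
-- stated objective: alternative
-- what changed: Replaces A's two-index while-loop walking the sorted array from both ends with a split into sorted lower half and reversed upper half interleaved by zip, appending the middle leftover once.
import Mathlib
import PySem

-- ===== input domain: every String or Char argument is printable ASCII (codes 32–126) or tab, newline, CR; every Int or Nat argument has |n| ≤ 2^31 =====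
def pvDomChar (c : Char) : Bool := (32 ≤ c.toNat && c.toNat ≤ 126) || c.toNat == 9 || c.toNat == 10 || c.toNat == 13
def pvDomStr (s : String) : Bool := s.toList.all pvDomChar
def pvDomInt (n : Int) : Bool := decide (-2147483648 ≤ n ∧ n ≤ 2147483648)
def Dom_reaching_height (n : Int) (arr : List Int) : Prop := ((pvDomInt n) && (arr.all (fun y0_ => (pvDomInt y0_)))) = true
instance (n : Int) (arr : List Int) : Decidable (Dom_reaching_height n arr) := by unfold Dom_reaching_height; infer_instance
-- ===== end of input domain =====

-- B replaces A's two-index while-loop over the sorted array with a split into lower half and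
-- reversed upper half interleaved by zip (alternative decomposition, same cost); both A and B
-- sort arr in place (same side effect), the equivalence proved is about the return value.


-- ===== PORT A =====
-- the while loop: start/end indices over the sorted list s, accumulator `new`
-- (indices are always in range when the loop runs, so pyGetD's default 0 is never used)
def rhLoop (s : List Int) (start e : Int) (new : List Int) : List Int :=
  if _h : start ≤ e then
    let new' :=
      if start = e then new ++ [PySem.List.pyGetD s start 0]
      else new ++ [PySem.List.pyGetD s e 0, PySem.List.pyGetD s start 0]
    rhLoop s (start + 1) (e - 1) new'
  else new
termination_by (e + 1 - start).toNat
decreasing_by omega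

def reaching_height (n : Int) (arr : List Int) : List Int :=
  if n = 1 then arr
  else if (PySem.Set.ofList arr).length = 1 then [-1]
  else
    let s := PySem.List.sorted arr (fun x => x) false
    rhLoop s 0 ((s.length : Int) - 1) []

-- ===== PORT B =====
def reaching_height_alt (n : Int) (arr : List Int) : List Int :=
  if n = 1 then arr
  else if (PySem.Set.ofList arr).length = 1 then [-1]
  else
    let s := PySem.List.sorted arr (fun x => x) false
    let mid := PySem.Int.floordiv (s.length : Int) 2
    let lower := PySem.List.slice s none (some mid)
    -- arr[mid:][::-1]: slice?_none_none_neg_one says xs[::-1] = xs.reverse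
    let upper := (PySem.List.slice s (some mid) none).reverse
    let new := (upper.zip lower).flatMap (fun p => [p.1, p.2])
    if lower.length < upper.length then new ++ [PySem.List.pyGetD upper (-1) 0] else new

-- ===== PRECONDITION & SPEC =====
def Spec_reaching_height (n : Int) (arr : List Int) (out : List Int) : Prop := out = reaching_height_alt n arr
instance (n : Int) (arr : List Int) (out : List Int) : Decidable (Spec_reaching_height n arr out) := by unfold Spec_reaching_height; infer_instance

-- ===== CLAIM (what is proved, stated in full; the proofs are below) =====
def Claim_equal_reaching_height : Prop := ∀ (n : Int) (arr : List Int), Dom_reaching_height n arr → Spec_reaching_height n arr (reaching_height n arr)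

-- ===== LEMMAS AND PROOFS =====

-- the common characterisation: peel last and first, recurse on the interior
def zig (l : List Int) : List Int :=
  if _h : l.length ≤ 1 then l
  else (l.getLast?.getD 0) :: (l.head?.getD 0) :: zig l.dropLast.tail
termination_by l.length
decreasing_by simp [List.length_tail, List.length_dropLast]; omega

theorem zig_nil : zig [] = [] := by simp [zig]

theorem zig_single (x : Int) : zig [x] = [x] := by simp [zig]

theorem zig_step (x y : Int) (m : List Int) :
    zig (x :: (m ++ [y])) = y :: x :: zig m := by
  rw [zig]
  have hlen : (x :: (m ++ [y])).length = m.length + 2 := by simp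
  rw [dif_neg (by omega)]
  have h1 : (x :: (m ++ [y])).getLast? = some y := by
    rw [show x :: (m ++ [y]) = (x :: m) ++ [y] from rfl, List.getLast?_concat]
  have h2 : (x :: (m ++ [y])).dropLast = x :: m := by
    rw [show x :: (m ++ [y]) = (x :: m) ++ [y] from rfl, List.dropLast_concat]
  rw [h1, h2]
  simp

-- A's loop computes zig of the segment s[a..b]
theorem rhLoop_eq_zig (s : List Int) (a b : Int) (acc : List Int)
    (ha : 0 ≤ a) (hb : b < s.length) :
    rhLoop s a b acc = acc ++ zig ((s.drop a.toNat).take (b + 1 - a).toNat) := by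
  rw [rhLoop]
  by_cases hle : a ≤ b
  · rw [dif_pos hle]
    have halen : a.toNat < s.length := by omega
    have hseg : s.drop a.toNat = s[a.toNat] :: s.drop (a.toNat + 1) := by
      rw [List.drop_eq_getElem_cons halen]
    have hget_a : PySem.List.pyGetD s a 0 = s[a.toNat] :=
      PySem.List.pyGetD_eq_getElem s 0 ha (by omega)
    by_cases heq : a = b
    · subst heq
      rw [if_pos rfl]
      rw [rhLoop_eq_zig s (a + 1) (a - 1) _ (by omega) (by omega)]
      have : (a - 1 + 1 - (a + 1)).toNat = 0 := by omega
      rw [this]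
      have h1 : (a + 1 - a).toNat = 1 := by omega
      have htake : (s.drop a.toNat).take 1 = [s[a.toNat]] := by rw [hseg]; rfl
      rw [List.take_zero, zig_nil, h1, htake, zig_single, hget_a]
      simp
    · rw [if_neg heq]
      have hab : a < b := by omega
      rw [rhLoop_eq_zig s (a + 1) (b - 1) _ (by omega) (show b - 1 < (s.length : Int) by omega)]
      have hbn : b.toNat < s.length := by omega
      have hget_b : PySem.List.pyGetD s b 0 = s[b.toNat] :=
        PySem.List.pyGetD_eq_getElem s 0 (by omega) (by omega)
      -- the segment s[a..b] is s[a] :: interior ++ [s[b]]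
      have hk : (b + 1 - a).toNat = (b - a - 1).toNat + 2 := by omega
      have hk2 : (b + 1 - (a + 1)).toNat = (b - a - 1).toNat + 1 := by omega
      have hinterior : (s.drop (a.toNat + 1)).take ((b - a - 1).toNat + 1)
          = (s.drop (a.toNat + 1)).take (b - a - 1).toNat ++ [s[b.toNat]] := by
        have hlt : (b - a - 1).toNat < (s.drop (a.toNat + 1)).length := by
          simp [List.length_drop]; omega
        rw [List.take_add_one, List.getElem?_eq_getElem hlt]
        simp [List.getElem_drop]
        congr 1
        omega
      have hseg2 : (s.drop a.toNat).take (b + 1 - a).toNat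
          = s[a.toNat] :: ((s.drop (a.toNat + 1)).take (b - a - 1).toNat ++ [s[b.toNat]]) := by
        rw [hk, hseg]
        simp only [List.take_succ_cons]
        rw [hinterior]
      have e1 : (b - 1 + 1 - (a + 1)).toNat = (b - a - 1).toNat := by omega
      have e2 : (a + 1).toNat = a.toNat + 1 := by omega
      have hrec : (s.drop (a + 1).toNat).take (b - 1 + 1 - (a + 1)).toNat
          = (s.drop (a.toNat + 1)).take (b - a - 1).toNat := by rw [e1, e2]
      rw [hrec, hseg2, zig_step s[a.toNat] s[b.toNat] ((s.drop (a.toNat + 1)).take (b - a - 1).toNat),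
          hget_a, hget_b]
      simp
  · rw [dif_neg hle]
    have : (b + 1 - a).toNat = 0 := by omega
    rw [this]
    simp [zig_nil]
termination_by (b + 1 - a).toNat
decreasing_by all_goals omega

-- B's body computes zig s, by bidirectional induction
def bodyB (s : List Int) : List Int :=
  if (s.take (s.length / 2)).length < ((s.drop (s.length / 2)).reverse).length then
    (((s.drop (s.length / 2)).reverse.zip (s.take (s.length / 2))).flatMap (fun p => [p.1, p.2]))
      ++ [PySem.List.pyGetD ((s.drop (s.length / 2)).reverse) (-1) 0]
  else
    ((s.drop (s.length / 2)).reverse.zip (s.take (s.length / 2))).flatMap (fun p => [p.1, p.2])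

theorem bodyB_eq_zig (s : List Int) : bodyB s = zig s := by
  induction s using List.bidirectionalRec with
  | nil => simp [bodyB, zig_nil]
  | singleton x => simp [bodyB, zig_single, PySem.List.pyGetD_neg_one]
  | cons_append x m y ih =>
    have hle : m.length / 2 ≤ m.length := Nat.div_le_self _ _
    have hmid : (x :: (m ++ [y])).length / 2 = m.length / 2 + 1 := by
      simp only [List.length_cons, List.length_append, List.length_nil]
      omega
    have hlow : (x :: (m ++ [y])).take ((x :: (m ++ [y])).length / 2)
        = x :: m.take (m.length / 2) := by
      rw [hmid, List.take_succ_cons, List.take_append_of_le_length hle]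
    have hup : ((x :: (m ++ [y])).drop ((x :: (m ++ [y])).length / 2)).reverse
        = y :: (m.drop (m.length / 2)).reverse := by
      rw [hmid, List.drop_succ_cons, List.drop_append_of_le_length hle]
      simp
    rw [zig_step x y m, ← ih]
    unfold bodyB
    rw [hlow, hup]
    have hlenl : (x :: m.take (m.length / 2)).length = m.length / 2 + 1 := by
      simp [Nat.min_eq_left hle]
    have hlenu : (y :: (m.drop (m.length / 2)).reverse).length
        = (m.length - m.length / 2) + 1 := by simp
    have hlenl' : (m.take (m.length / 2)).length = m.length / 2 := by
      simp [Nat.min_eq_left hle]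
    have hlenu' : ((m.drop (m.length / 2)).reverse).length = m.length - m.length / 2 := by simp
    rw [hlenl, hlenu]
    by_cases hc : m.length / 2 < m.length - m.length / 2
    · rw [if_pos (by omega), if_pos (by rw [hlenl', hlenu']; omega)]
      have hne : (m.drop (m.length / 2)).reverse ≠ [] := by
        intro h
        have := congrArg List.length h
        simp only [hlenu', List.length_nil] at this
        omega
      have hlast : PySem.List.pyGetD (y :: (m.drop (m.length / 2)).reverse) (-1) 0
          = PySem.List.pyGetD ((m.drop (m.length / 2)).reverse) (-1) 0 := by
        rw [PySem.List.pyGetD_neg_one (y :: (m.drop (m.length / 2)).reverse) 0 (by simp),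
            PySem.List.pyGetD_neg_one ((m.drop (m.length / 2)).reverse) 0 hne]
        exact List.getLast_cons hne
      rw [hlast]
      simp
    · rw [if_neg (by omega), if_neg (by rw [hlenl', hlenu']; omega)]
      simp

-- bridge: the alt port's slices are take/drop of the sorted list
theorem alt_else_eq_bodyB (s : List Int) :
    (let mid := PySem.Int.floordiv (s.length : Int) 2
     let lower := PySem.List.slice s none (some mid)
     let upper := (PySem.List.slice s (some mid) none).reverse
     let new := (upper.zip lower).flatMap (fun p => [p.1, p.2])
     if lower.length < upper.length then new ++ [PySem.List.pyGetD upper (-1) 0] else new)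
    = bodyB s := by
  have hmid : PySem.Int.floordiv (s.length : Int) 2 = ((s.length / 2 : Nat) : Int) := by
    exact_mod_cast PySem.Int.floordiv_natCast s.length 2
  simp only [hmid, PySem.List.slice_to_natCast, PySem.List.slice_from_natCast, bodyB]

theorem rhLoop_all (s : List Int) : rhLoop s 0 ((s.length : Int) - 1) [] = zig s := by
  by_cases hnil : s = []
  · subst hnil
    rw [rhLoop]
    simp [zig_nil]
  · have hlen : 0 < s.length := List.length_pos_iff.mpr hnil
    rw [rhLoop_eq_zig s 0 ((s.length : Int) - 1) [] le_rfl (by omega)]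
    have h : ((s.length : Int) - 1 + 1 - 0).toNat = s.length := by omega
    rw [h]
    simp

theorem reaching_height_spec' (n : Int) (arr : List Int) :
    reaching_height n arr = reaching_height_alt n arr := by
  unfold reaching_height reaching_height_alt
  by_cases h1 : n = 1
  · simp [h1]
  · by_cases h2 : (PySem.Set.ofList arr).length = 1
    · simp [h1, h2]
    · simp only [if_neg h1, if_neg h2]
      rw [alt_else_eq_bodyB, bodyB_eq_zig]
      exact rhLoop_all _

-- ===== VERDICT (by name: the statement is the Claim_ definition above) =====
theorem reaching_height_spec : Claim_equal_reaching_height := by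
  intro n arr _
  unfold Spec_reaching_height
  exact reaching_height_spec' n arr
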